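-- pv_equiv track=rewrite | github.com/AfterWorld/ultcogs | bounty/bounty.py | get_redeemable_roles
-- ===== SOURCE A (Python) =====
-- def get_redeemable_roles(bounty_amount):
--     """Get the roles that can be redeemed based on the bounty amount."""
--     roles = [
--         (50000000, "Rookie Pirate"),
--         (100000000, "Super Rookie"),
--         (200000000, "Notorious Pirate"),
--         (300000000, "Supernova"),
--         (400000000, "Rising Star"),
--         (500000000, "Infamous Pirate"),
--         (600000000, "Feared Pirate"),
--         (700000000, "Pirate Captain"),
--         (800000000, "Pirate Lord"),
--         (900000000, "Pirate Emperor"),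
--         (1000000000, "Yonko"),
--         (1500000000, "Pirate King Candidate"),
--         (2000000000, "King of the Pirates")
--     ]
--     return [role for amount, role in roles if bounty_amount >= amount]
-- ===== SOURCE B (Python) =====
-- import bisect
--
-- _THRESHOLDS = [50000000, 100000000, 200000000, 300000000, 400000000,
--                500000000, 600000000, 700000000, 800000000, 900000000,
--                1000000000, 1500000000, 2000000000]
-- _ROLES = ["Rookie Pirate", "Super Rookie", "Notorious Pirate", "Supernova",
--           "Rising Star", "Infamous Pirate", "Feared Pirate", "Pirate Captain",
--           "Pirate Lord", "Pirate Emperor", "Yonko", "Pirate King Candidate",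
--           "King of the Pirates"]
--
-- def get_redeemable_roles(bounty_amount):
--     """Get the roles that can be redeemed based on the bounty amount."""
--     cut = bisect.bisect_right(_THRESHOLDS, bounty_amount)
--     return _ROLES[:cut]
-- ===== Notes on version B (the rewrite author's own statement) =====
-- stated objective: alternative
-- what changed: Replaces the per-pair >= comprehension scan with a binary search (bisect_right) over the ascending threshold list and a prefix slice of the role names.
import Mathlib
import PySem

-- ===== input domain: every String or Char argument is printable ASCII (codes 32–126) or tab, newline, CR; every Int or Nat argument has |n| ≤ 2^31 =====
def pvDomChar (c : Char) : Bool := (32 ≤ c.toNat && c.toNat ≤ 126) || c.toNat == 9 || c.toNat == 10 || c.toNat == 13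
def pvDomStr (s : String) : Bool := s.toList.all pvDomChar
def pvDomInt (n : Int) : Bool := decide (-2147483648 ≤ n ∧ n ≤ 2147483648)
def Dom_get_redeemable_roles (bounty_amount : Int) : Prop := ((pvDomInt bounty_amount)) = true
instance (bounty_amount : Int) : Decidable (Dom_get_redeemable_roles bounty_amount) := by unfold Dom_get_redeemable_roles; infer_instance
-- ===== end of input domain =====

-- B replaces the linear >=-scan of the 13 (threshold, role) pairs by a binary
-- search (bisect_right) over the ascending thresholds plus a prefix slice.

-- ===== PORT A =====
def get_redeemable_roles (bounty_amount : Int) : List String :=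
  let roles : List (Int × String) :=
    [(50000000, "Rookie Pirate"),
     (100000000, "Super Rookie"),
     (200000000, "Notorious Pirate"),
     (300000000, "Supernova"),
     (400000000, "Rising Star"),
     (500000000, "Infamous Pirate"),
     (600000000, "Feared Pirate"),
     (700000000, "Pirate Captain"),
     (800000000, "Pirate Lord"),
     (900000000, "Pirate Emperor"),
     (1000000000, "Yonko"),
     (1500000000, "Pirate King Candidate"),
     (2000000000, "King of the Pirates")]
  -- list comprehension with a filter condition, ported as foldr building the list
  roles.foldr (fun p acc => if bounty_amount ≥ p.1 then p.2 :: acc else acc) []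

-- ===== PORT B =====
def pvThresholds : List Int :=
  [50000000, 100000000, 200000000, 300000000, 400000000, 500000000, 600000000,
   700000000, 800000000, 900000000, 1000000000, 1500000000, 2000000000]

def pvRoles : List String :=
  ["Rookie Pirate", "Super Rookie", "Notorious Pirate", "Supernova",
   "Rising Star", "Infamous Pirate", "Feared Pirate", "Pirate Captain",
   "Pirate Lord", "Pirate Emperor", "Yonko", "Pirate King Candidate",
   "King of the Pirates"]

-- bisect.bisect_right, transliterated: while lo < hi loop with mid = (lo+hi)//2,
-- driven by a fuel counter (hi - lo shrinks each turn, so xs.length+1 fuel suffices)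
def pvBisectGo (xs : List Int) (x : Int) : Nat → Nat → Nat → Nat
  | 0, lo, _ => lo
  | fuel + 1, lo, hi =>
    if lo < hi then
      let mid := (lo + hi) / 2
      if x < xs.getD mid 0 then pvBisectGo xs x fuel lo mid
      else pvBisectGo xs x fuel (mid + 1) hi
    else lo

def pvBisectRight (xs : List Int) (x : Int) : Nat :=
  pvBisectGo xs x (xs.length + 1) 0 xs.length

def get_redeemable_roles_alt (bounty_amount : Int) : List String :=
  let cut := pvBisectRight pvThresholds bounty_amount
  pvRoles.take cut

-- ===== PRECONDITION & SPEC =====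
def Spec_get_redeemable_roles (bounty_amount : Int) (out : List String) : Prop := out = get_redeemable_roles_alt bounty_amount
instance (bounty_amount : Int) (out : List String) : Decidable (Spec_get_redeemable_roles bounty_amount out) := by unfold Spec_get_redeemable_roles; infer_instance

-- ===== CLAIM (what is proved, stated in full; the proofs are below) =====
def Claim_equal_get_redeemable_roles : Prop := ∀ (bounty_amount : Int), Dom_get_redeemable_roles bounty_amount → Spec_get_redeemable_roles bounty_amount (get_redeemable_roles bounty_amount)

-- ===== LEMMAS AND PROOFS =====

-- ===== VERDICT (by name: the statement is the Claim_ definition above) =====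
set_option maxRecDepth 4000 in
theorem get_redeemable_roles_spec : Claim_equal_get_redeemable_roles := by
  intro b _
  unfold Spec_get_redeemable_roles get_redeemable_roles get_redeemable_roles_alt
  by_cases h0 : b < 50000000
  · simp [pvBisectRight, pvBisectGo, pvThresholds, pvRoles, show ¬((50000000:Int) ≤ b) from by omega, show ¬((100000000:Int) ≤ b) from by omega, show ¬((200000000:Int) ≤ b) from by omega, show ¬((300000000:Int) ≤ b) from by omega, show ¬((400000000:Int) ≤ b) from by omega, show ¬((500000000:Int) ≤ b) from by omega, show ¬((600000000:Int) ≤ b) from by omega, show ¬((700000000:Int) ≤ b) from by omega, show ¬((800000000:Int) ≤ b) from by omega, show ¬((900000000:Int) ≤ b) from by omega, show ¬((1000000000:Int) ≤ b) from by omega, show ¬((1500000000:Int) ≤ b) from by omega, show ¬((2000000000:Int) ≤ b) from by omega, show b < (600000000:Int) from by omega, show b < (300000000:Int) from by omega, show b < (100000000:Int) from by omega, show b < (50000000:Int) from by omega]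
  by_cases h1 : b < 100000000
  · simp [pvBisectRight, pvBisectGo, pvThresholds, pvRoles, show (50000000:Int) ≤ b from by omega, show ¬((100000000:Int) ≤ b) from by omega, show ¬((200000000:Int) ≤ b) from by omega, show ¬((300000000:Int) ≤ b) from by omega, show ¬((400000000:Int) ≤ b) from by omega, show ¬((500000000:Int) ≤ b) from by omega, show ¬((600000000:Int) ≤ b) from by omega, show ¬((700000000:Int) ≤ b) from by omega, show ¬((800000000:Int) ≤ b) from by omega, show ¬((900000000:Int) ≤ b) from by omega, show ¬((1000000000:Int) ≤ b) from by omega, show ¬((1500000000:Int) ≤ b) from by omega, show ¬((2000000000:Int) ≤ b) from by omega, show b < (600000000:Int) from by omega, show b < (300000000:Int) from by omega, show b < (100000000:Int) from by omega, show ¬(b < (50000000:Int)) from by omega]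
  by_cases h2 : b < 200000000
  · simp [pvBisectRight, pvBisectGo, pvThresholds, pvRoles, show (50000000:Int) ≤ b from by omega, show (100000000:Int) ≤ b from by omega, show ¬((200000000:Int) ≤ b) from by omega, show ¬((300000000:Int) ≤ b) from by omega, show ¬((400000000:Int) ≤ b) from by omega, show ¬((500000000:Int) ≤ b) from by omega, show ¬((600000000:Int) ≤ b) from by omega, show ¬((700000000:Int) ≤ b) from by omega, show ¬((800000000:Int) ≤ b) from by omega, show ¬((900000000:Int) ≤ b) from by omega, show ¬((1000000000:Int) ≤ b) from by omega, show ¬((1500000000:Int) ≤ b) from by omega, show ¬((2000000000:Int) ≤ b) from by omega, show b < (600000000:Int) from by omega, show b < (300000000:Int) from by omega, show ¬(b < (100000000:Int)) from by omega, show b < (200000000:Int) from by omega]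
  by_cases h3 : b < 300000000
  · simp [pvBisectRight, pvBisectGo, pvThresholds, pvRoles, show (50000000:Int) ≤ b from by omega, show (100000000:Int) ≤ b from by omega, show (200000000:Int) ≤ b from by omega, show ¬((300000000:Int) ≤ b) from by omega, show ¬((400000000:Int) ≤ b) from by omega, show ¬((500000000:Int) ≤ b) from by omega, show ¬((600000000:Int) ≤ b) from by omega, show ¬((700000000:Int) ≤ b) from by omega, show ¬((800000000:Int) ≤ b) from by omega, show ¬((900000000:Int) ≤ b) from by omega, show ¬((1000000000:Int) ≤ b) from by omega, show ¬((1500000000:Int) ≤ b) from by omega, show ¬((2000000000:Int) ≤ b) from by omega, show b < (600000000:Int) from by omega, show b < (300000000:Int) from by omega, show ¬(b < (100000000:Int)) from by omega, show ¬(b < (200000000:Int)) from by omega]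
  by_cases h4 : b < 400000000
  · simp [pvBisectRight, pvBisectGo, pvThresholds, pvRoles, show (50000000:Int) ≤ b from by omega, show (100000000:Int) ≤ b from by omega, show (200000000:Int) ≤ b from by omega, show (300000000:Int) ≤ b from by omega, show ¬((400000000:Int) ≤ b) from by omega, show ¬((500000000:Int) ≤ b) from by omega, show ¬((600000000:Int) ≤ b) from by omega, show ¬((700000000:Int) ≤ b) from by omega, show ¬((800000000:Int) ≤ b) from by omega, show ¬((900000000:Int) ≤ b) from by omega, show ¬((1000000000:Int) ≤ b) from by omega, show ¬((1500000000:Int) ≤ b) from by omega, show ¬((2000000000:Int) ≤ b) from by omega, show b < (600000000:Int) from by omega, show ¬(b < (300000000:Int)) from by omega, show b < (500000000:Int) from by omega, show b < (400000000:Int) from by omega]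
  by_cases h5 : b < 500000000
  · simp [pvBisectRight, pvBisectGo, pvThresholds, pvRoles, show (50000000:Int) ≤ b from by omega, show (100000000:Int) ≤ b from by omega, show (200000000:Int) ≤ b from by omega, show (300000000:Int) ≤ b from by omega, show (400000000:Int) ≤ b from by omega, show ¬((500000000:Int) ≤ b) from by omega, show ¬((600000000:Int) ≤ b) from by omega, show ¬((700000000:Int) ≤ b) from by omega, show ¬((800000000:Int) ≤ b) from by omega, show ¬((900000000:Int) ≤ b) from by omega, show ¬((1000000000:Int) ≤ b) from by omega, show ¬((1500000000:Int) ≤ b) from by omega, show ¬((2000000000:Int) ≤ b) from by omega, show b < (600000000:Int) from by omega, show ¬(b < (300000000:Int)) from by omega, show b < (500000000:Int) from by omega, show ¬(b < (400000000:Int)) from by omega]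
  by_cases h6 : b < 600000000
  · simp [pvBisectRight, pvBisectGo, pvThresholds, pvRoles, show (50000000:Int) ≤ b from by omega, show (100000000:Int) ≤ b from by omega, show (200000000:Int) ≤ b from by omega, show (300000000:Int) ≤ b from by omega, show (400000000:Int) ≤ b from by omega, show (500000000:Int) ≤ b from by omega, show ¬((600000000:Int) ≤ b) from by omega, show ¬((700000000:Int) ≤ b) from by omega, show ¬((800000000:Int) ≤ b) from by omega, show ¬((900000000:Int) ≤ b) from by omega, show ¬((1000000000:Int) ≤ b) from by omega, show ¬((1500000000:Int) ≤ b) from by omega, show ¬((2000000000:Int) ≤ b) from by omega, show b < (600000000:Int) from by omega, show ¬(b < (300000000:Int)) from by omega, show ¬(b < (500000000:Int)) from by omega]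
  by_cases h7 : b < 700000000
  · simp [pvBisectRight, pvBisectGo, pvThresholds, pvRoles, show (50000000:Int) ≤ b from by omega, show (100000000:Int) ≤ b from by omega, show (200000000:Int) ≤ b from by omega, show (300000000:Int) ≤ b from by omega, show (400000000:Int) ≤ b from by omega, show (500000000:Int) ≤ b from by omega, show (600000000:Int) ≤ b from by omega, show ¬((700000000:Int) ≤ b) from by omega, show ¬((800000000:Int) ≤ b) from by omega, show ¬((900000000:Int) ≤ b) from by omega, show ¬((1000000000:Int) ≤ b) from by omega, show ¬((1500000000:Int) ≤ b) from by omega, show ¬((2000000000:Int) ≤ b) from by omega, show ¬(b < (600000000:Int)) from by omega, show b < (1000000000:Int) from by omega, show b < (800000000:Int) from by omega, show b < (700000000:Int) from by omega]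
  by_cases h8 : b < 800000000
  · simp [pvBisectRight, pvBisectGo, pvThresholds, pvRoles, show (50000000:Int) ≤ b from by omega, show (100000000:Int) ≤ b from by omega, show (200000000:Int) ≤ b from by omega, show (300000000:Int) ≤ b from by omega, show (400000000:Int) ≤ b from by omega, show (500000000:Int) ≤ b from by omega, show (600000000:Int) ≤ b from by omega, show (700000000:Int) ≤ b from by omega, show ¬((800000000:Int) ≤ b) from by omega, show ¬((900000000:Int) ≤ b) from by omega, show ¬((1000000000:Int) ≤ b) from by omega, show ¬((1500000000:Int) ≤ b) from by omega, show ¬((2000000000:Int) ≤ b) from by omega, show ¬(b < (600000000:Int)) from by omega, show b < (1000000000:Int) from by omega, show b < (800000000:Int) from by omega, show ¬(b < (700000000:Int)) from by omega]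
  by_cases h9 : b < 900000000
  · simp [pvBisectRight, pvBisectGo, pvThresholds, pvRoles, show (50000000:Int) ≤ b from by omega, show (100000000:Int) ≤ b from by omega, show (200000000:Int) ≤ b from by omega, show (300000000:Int) ≤ b from by omega, show (400000000:Int) ≤ b from by omega, show (500000000:Int) ≤ b from by omega, show (600000000:Int) ≤ b from by omega, show (700000000:Int) ≤ b from by omega, show (800000000:Int) ≤ b from by omega, show ¬((900000000:Int) ≤ b) from by omega, show ¬((1000000000:Int) ≤ b) from by omega, show ¬((1500000000:Int) ≤ b) from by omega, show ¬((2000000000:Int) ≤ b) from by omega, show ¬(b < (600000000:Int)) from by omega, show b < (1000000000:Int) from by omega, show ¬(b < (800000000:Int)) from by omega, show b < (900000000:Int) from by omega]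
  by_cases h10 : b < 1000000000
  · simp [pvBisectRight, pvBisectGo, pvThresholds, pvRoles, show (50000000:Int) ≤ b from by omega, show (100000000:Int) ≤ b from by omega, show (200000000:Int) ≤ b from by omega, show (300000000:Int) ≤ b from by omega, show (400000000:Int) ≤ b from by omega, show (500000000:Int) ≤ b from by omega, show (600000000:Int) ≤ b from by omega, show (700000000:Int) ≤ b from by omega, show (800000000:Int) ≤ b from by omega, show (900000000:Int) ≤ b from by omega, show ¬((1000000000:Int) ≤ b) from by omega, show ¬((1500000000:Int) ≤ b) from by omega, show ¬((2000000000:Int) ≤ b) from by omega, show ¬(b < (600000000:Int)) from by omega, show b < (1000000000:Int) from by omega, show ¬(b < (800000000:Int)) from by omega, show ¬(b < (900000000:Int)) from by omega]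
  by_cases h11 : b < 1500000000
  · simp [pvBisectRight, pvBisectGo, pvThresholds, pvRoles, show (50000000:Int) ≤ b from by omega, show (100000000:Int) ≤ b from by omega, show (200000000:Int) ≤ b from by omega, show (300000000:Int) ≤ b from by omega, show (400000000:Int) ≤ b from by omega, show (500000000:Int) ≤ b from by omega, show (600000000:Int) ≤ b from by omega, show (700000000:Int) ≤ b from by omega, show (800000000:Int) ≤ b from by omega, show (900000000:Int) ≤ b from by omega, show (1000000000:Int) ≤ b from by omega, show ¬((1500000000:Int) ≤ b) from by omega, show ¬((2000000000:Int) ≤ b) from by omega, show ¬(b < (600000000:Int)) from by omega, show ¬(b < (1000000000:Int)) from by omega, show b < (2000000000:Int) from by omega, show b < (1500000000:Int) from by omega]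
  by_cases h12 : b < 2000000000
  · simp [pvBisectRight, pvBisectGo, pvThresholds, pvRoles, show (50000000:Int) ≤ b from by omega, show (100000000:Int) ≤ b from by omega, show (200000000:Int) ≤ b from by omega, show (300000000:Int) ≤ b from by omega, show (400000000:Int) ≤ b from by omega, show (500000000:Int) ≤ b from by omega, show (600000000:Int) ≤ b from by omega, show (700000000:Int) ≤ b from by omega, show (800000000:Int) ≤ b from by omega, show (900000000:Int) ≤ b from by omega, show (1000000000:Int) ≤ b from by omega, show (1500000000:Int) ≤ b from by omega, show ¬((2000000000:Int) ≤ b) from by omega, show ¬(b < (600000000:Int)) from by omega, show ¬(b < (1000000000:Int)) from by omega, show b < (2000000000:Int) from by omega, show ¬(b < (1500000000:Int)) from by omega]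
  simp [pvBisectRight, pvBisectGo, pvThresholds, pvRoles, show (50000000:Int) ≤ b from by omega, show (100000000:Int) ≤ b from by omega, show (200000000:Int) ≤ b from by omega, show (300000000:Int) ≤ b from by omega, show (400000000:Int) ≤ b from by omega, show (500000000:Int) ≤ b from by omega, show (600000000:Int) ≤ b from by omega, show (700000000:Int) ≤ b from by omega, show (800000000:Int) ≤ b from by omega, show (900000000:Int) ≤ b from by omega, show (1000000000:Int) ≤ b from by omega, show (1500000000:Int) ≤ b from by omega, show (2000000000:Int) ≤ b from by omega, show ¬(b < (600000000:Int)) from by omega, show ¬(b < (1000000000:Int)) from by omega, show ¬(b < (2000000000:Int)) from by omega]
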